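-- pv_equiv track=rewrite | github.com/0xPolygonZero/plonky2 | projects/cache-friendly-fft/__init__.py | _scrach_length
-- ===== SOURCE A (Python) =====
-- def _scrach_length(lb_n):
--     """Find the amount of scratch space required to run the FFT.
--
--     Layers where the input's length is an even power of two do not
--     require scratch space, but the layers where that power is odd do.
--     """
--     if lb_n == 0:
--         # Length-1 input.
--         return 0
--     # Repeatedly halve lb_n as long as it's even. This is the same as
--     # `n = sqrt(n)`, where the `sqrt` is exact.
--     while lb_n & 1 == 0:
--         lb_n >>= 1
--     # `lb_n` is now odd, so `n` is not an even power of 2.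
--     lb_res = (lb_n - 1) >> 1
--     if lb_res == 0:
--         # Special case (n == 2 or n == 4): no scratch needed.
--         return 0
--     return 1 << lb_res
-- ===== SOURCE B (Python) =====
-- def _scrach_length(lb_n):
--     """Scratch space for the FFT: closed-form odd-part extraction
--     (lowest-set-bit trick) instead of the halving loop."""
--     if lb_n == 0:
--         # Length-1 input.
--         return 0
--     # Odd part of lb_n in O(1): shift out all trailing zero bits at once.
--     shift = (lb_n & -lb_n).bit_length() - 1
--     m = lb_n >> shift
--     lb_res = (m - 1) >> 1
--     return 0 if lb_res == 0 else 1 << lb_res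
-- ===== Notes on version B (the rewrite author's own statement) =====
-- stated objective: alternative
-- what changed: The halving while-loop that extracts the odd part of lb_n is replaced by a branch-free closed form: shift = (lb_n & -lb_n).bit_length() - 1, m = lb_n >> shift; the zero guard and output tail are unchanged.
import Mathlib
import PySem

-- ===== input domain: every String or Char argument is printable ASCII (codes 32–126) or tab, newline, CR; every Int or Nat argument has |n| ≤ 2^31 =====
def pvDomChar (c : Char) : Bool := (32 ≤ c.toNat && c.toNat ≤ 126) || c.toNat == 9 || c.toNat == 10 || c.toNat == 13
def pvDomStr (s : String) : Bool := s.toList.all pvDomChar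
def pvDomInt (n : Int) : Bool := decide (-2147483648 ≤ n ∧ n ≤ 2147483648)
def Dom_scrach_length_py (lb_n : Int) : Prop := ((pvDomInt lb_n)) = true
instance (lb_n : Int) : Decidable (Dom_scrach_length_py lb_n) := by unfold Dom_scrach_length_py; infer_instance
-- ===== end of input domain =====

-- B replaces A's halving while-loop by a branch-free lowest-set-bit extraction of the odd part;
-- equal results on all lb_n ≥ 0 (A raises ValueError on negative lb_n).

-- ===== PORT A =====

-- `lb_n & 1` for any Int equals `lb_n % 2` (Python `%`, i.e. `emod` for positive divisor);
-- the A port's loop cites this for termination.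
theorem pvLandOne (n : Int) : Int.land n 1 = n % 2 := by
  cases n with
  | ofNat m =>
      have h1 : Int.land (Int.ofNat m) 1 = ((m &&& 1 : Nat) : Int) := rfl
      rw [h1, Nat.and_one_is_mod, Int.ofNat_eq_natCast]
      omega
  | negSucc m =>
      have h1 : Int.land (Int.negSucc m) 1 = ((Nat.ldiff 1 m : Nat) : Int) := rfl
      have h2 : Nat.ldiff 1 m = 1 - m % 2 := by
        apply Nat.eq_of_testBit_eq
        intro i
        rw [Nat.testBit_ldiff]
        cases i with
        | zero =>
            simp only [Nat.testBit_zero]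
            rcases Nat.mod_two_eq_zero_or_one m with h | h <;> simp [h]
        | succ k =>
            simp only [Nat.testBit_succ]
            have h3 : (1:Nat) / 2 = 0 := by norm_num
            rcases Nat.mod_two_eq_zero_or_one m with h | h <;>
              simp [h3, h, Nat.zero_testBit]
      rw [h1, h2]
      rcases Nat.mod_two_eq_zero_or_one m with h | h <;>
        simp [h, Int.negSucc_eq] <;> omega

-- the `while lb_n & 1 == 0: lb_n >>= 1` loop of A (the `n ≠ 0` conjunct is a pure
-- totality guard: Python never enters the loop with lb_n = 0, the caller guards it)
def pyHalveOdd (n : Int) : Int :=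
  if h : Int.land n 1 = 0 ∧ n ≠ 0 then pyHalveOdd (Int.shiftRight n 1) else n
termination_by n.natAbs
decreasing_by
  rw [pvLandOne] at h
  cases n with
  | ofNat m =>
      have hm : m ≠ 0 := by rintro rfl; exact h.2 rfl
      have hs : Int.shiftRight ((m : Nat) : Int) 1 = ((m >>> 1 : Nat) : Int) := rfl
      simp only [Int.ofNat_eq_natCast, hs, Int.natAbs_natCast]
      have := Nat.shiftRight_eq_div_pow m 1
      omega
  | negSucc m =>
      have hm : m % 2 = 1 := by
        rcases Nat.mod_two_eq_zero_or_one m with h' | h'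
        · exfalso
          have := h.1
          rw [Int.negSucc_eq] at this
          omega
        · exact h'
      have hs : Int.shiftRight (Int.negSucc m) 1 = Int.negSucc (m >>> 1) := rfl
      simp only [hs, Int.natAbs_negSucc]
      have := Nat.shiftRight_eq_div_pow m 1
      omega

def scrach_length_py (lb_n : Int) : Int :=
  if lb_n = 0 then 0
  else
    let m := pyHalveOdd lb_n
    let lb_res := Int.shiftRight (m - 1) 1
    if lb_res = 0 then 0
    else Int.shiftLeft 1 lb_res.toNat  -- `1 << lb_res`; Python raises for lb_res < 0 (only outside Pre_)

-- ===== PORT B =====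
def scrach_length_py_alt (lb_n : Int) : Int :=
  if lb_n = 0 then 0
  else
    -- `(lb_n & -lb_n).bit_length() - 1`; x.bit_length() for x ≥ 0 is exactly Nat.size x.toNat
    let shift : Int := ((Nat.size (Int.land lb_n (-lb_n)).toNat : Nat) : Int) - 1
    let m := Int.shiftRight lb_n shift.toNat
    let lb_res := Int.shiftRight (m - 1) 1
    if lb_res = 0 then 0
    else Int.shiftLeft 1 lb_res.toNat  -- `1 << lb_res`; Python raises for lb_res < 0 (only outside Pre_)

-- ===== PRECONDITION & SPEC =====
-- A raises ValueError ("negative shift count" at `1 << lb_res`) on every negative lb_n.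
def Pre_scrach_length_py (lb_n : Int) : Prop := 0 ≤ lb_n
instance (lb_n : Int) : Decidable (Pre_scrach_length_py lb_n) := by unfold Pre_scrach_length_py; infer_instance
def pvWitness_scrach_length_py : Int := (12)

def Spec_scrach_length_py (lb_n : Int) (out : Int) : Prop := out = scrach_length_py_alt lb_n
instance (lb_n : Int) (out : Int) : Decidable (Spec_scrach_length_py lb_n out) := by unfold Spec_scrach_length_py; infer_instance

-- ===== CLAIM (what is proved, stated in full; the proofs are below) =====
def Claim_equal_scrach_length_py : Prop := ∀ (lb_n : Int), Dom_scrach_length_py lb_n → Pre_scrach_length_py lb_n → Spec_scrach_length_py lb_n (scrach_length_py lb_n)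

-- ===== LEMMAS AND PROOFS =====

-- `a & -a` for a positive Nat cast, computed via Nat.ldiff
theorem pvLandNeg (c : Nat) :
    Int.land ((c + 1 : Nat) : Int) (-((c + 1 : Nat) : Int)) = ((Nat.ldiff (c + 1) c : Nat) : Int) := by
  have hneg : -((c + 1 : Nat) : Int) = Int.negSucc c := by
    rw [Int.negSucc_eq]; push_cast; ring
  rw [hneg]; rfl

-- odd a: the lowest-set-bit trick gives 1
theorem pvLdiffOdd (a : Nat) (h : a % 2 = 1) : Nat.ldiff a (a - 1) = 1 := by
  apply Nat.eq_of_testBit_eq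
  intro i
  rw [Nat.testBit_ldiff]
  cases i with
  | zero =>
      simp only [Nat.testBit_zero]
      have : (a - 1) % 2 = 0 := by omega
      simp [h, this]
  | succ k =>
      simp only [Nat.testBit_succ]
      have h1 : (a - 1) / 2 = a / 2 := by omega
      have h2 : (1:Nat) / 2 = 0 := by norm_num
      rw [h1, h2, Nat.zero_testBit]
      simp

-- even a = 2c: the lowest set bit doubles
theorem pvLdiffEven (c : Nat) (h : 0 < c) :
    Nat.ldiff (2 * c) (2 * c - 1) = 2 * Nat.ldiff c (c - 1) := by
  apply Nat.eq_of_testBit_eq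
  intro i
  rw [Nat.testBit_ldiff]
  cases i with
  | zero =>
      simp only [Nat.testBit_zero]
      have h1 : (2 * c) % 2 = 0 := by omega
      have h2 : (2 * Nat.ldiff c (c - 1)) % 2 = 0 := by omega
      simp [h1, h2]
  | succ k =>
      simp only [Nat.testBit_succ]
      have h1 : (2 * c) / 2 = c := by omega
      have h2 : (2 * c - 1) / 2 = c - 1 := by omega
      have h3 : (2 * Nat.ldiff c (c - 1)) / 2 = Nat.ldiff c (c - 1) := by omega
      rw [h1, h2, h3, Nat.testBit_ldiff]

-- every positive Nat is 2^k * (2b+1), and `a & -a` (as ldiff) is exactly 2^k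
theorem pvDecomp (a : Nat) (h : 0 < a) :
    ∃ k b, a = 2 ^ k * (2 * b + 1) ∧ Nat.ldiff a (a - 1) = 2 ^ k := by
  induction a using Nat.strong_induction_on with
  | _ a ih =>
      rcases Nat.mod_two_eq_zero_or_one a with he | ho
      · -- even: a = 2c
        obtain ⟨c, rfl⟩ : ∃ c, a = 2 * c := ⟨a / 2, by omega⟩
        have hc : 0 < c := by omega
        obtain ⟨k, b, h1, h2⟩ := ih c (by omega) hc
        exact ⟨k + 1, b, by rw [pow_succ, h1]; ring,
               by rw [pvLdiffEven c hc, h2, pow_succ]; ring⟩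
      · exact ⟨0, a / 2, by omega, by rw [pvLdiffOdd a ho]; norm_num⟩

-- A's loop on 2^k * (odd) strips exactly the 2^k
theorem pvHalveOddEq (k b : Nat) :
    pyHalveOdd ((2 ^ k * (2 * b + 1) : Nat) : Int) = ((2 * b + 1 : Nat) : Int) := by
  induction k with
  | zero =>
      rw [pyHalveOdd]
      rw [dif_neg]
      · norm_num
      · rw [pvLandOne]
        intro ⟨h1, _⟩
        rw [show ((2 ^ 0 * (2 * b + 1) : Nat) : Int) = 2 * (b : Int) + 1 by push_cast; ring] at h1
        omega
  | succ k ih =>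
      rw [pyHalveOdd, dif_pos]
      · have hs : Int.shiftRight ((2 ^ (k + 1) * (2 * b + 1) : Nat) : Int) 1
            = ((2 ^ k * (2 * b + 1) : Nat) : Int) := by
          rw [show Int.shiftRight ((2 ^ (k + 1) * (2 * b + 1) : Nat) : Int) 1
                = ((2 ^ (k + 1) * (2 * b + 1)) >>> 1 : Nat) from rfl]
          rw [Nat.shiftRight_eq_div_pow]
          congr 1
          rw [show 2 ^ (k + 1) * (2 * b + 1) = 2 * (2 ^ k * (2 * b + 1)) by rw [pow_succ]; ring,
              pow_one, Nat.mul_div_cancel_left _ (by norm_num)]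
        rw [hs, ih]
      · constructor
        · rw [pvLandOne]
          obtain ⟨c, hc⟩ : ∃ c, 2 ^ (k + 1) * (2 * b + 1) = 2 * c :=
            ⟨2 ^ k * (2 * b + 1), by rw [pow_succ]; ring⟩
          rw [hc]
          omega
        · have : 0 < 2 ^ (k + 1) * (2 * b + 1) := by positivity
          intro hc
          omega

-- ===== VERDICT (by name: the statement is the Claim_ definition above) =====
theorem scrach_length_py_spec : Claim_equal_scrach_length_py := by
  intro lb_n _ hpre
  unfold Spec_scrach_length_py Pre_scrach_length_py at *
  obtain ⟨a, rfl⟩ : ∃ a : Nat, lb_n = (a : Int) := ⟨lb_n.toNat, by omega⟩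
  rcases Nat.eq_zero_or_pos a with rfl | hpos
  · simp [scrach_length_py, scrach_length_py_alt]
  · obtain ⟨k, b, hab, hld⟩ := pvDecomp a hpos
    have hne : ((a : Nat) : Int) ≠ 0 := by exact_mod_cast Nat.pos_iff_ne_zero.mp hpos
    unfold scrach_length_py scrach_length_py_alt
    rw [if_neg hne, if_neg hne]
    -- A side: the loop result
    have hA : pyHalveOdd ((a : Nat) : Int) = ((2 * b + 1 : Nat) : Int) := by
      rw [show a = 2 ^ k * (2 * b + 1) from hab]; exact pvHalveOddEq k b
    -- B side: shift = k, so m is the same odd part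
    have hland : Int.land ((a : Nat) : Int) (-((a : Nat) : Int)) = ((2 ^ k : Nat) : Int) := by
      obtain ⟨c, rfl⟩ : ∃ c, a = c + 1 := ⟨a - 1, by omega⟩
      rw [pvLandNeg c]
      simp only [Nat.add_sub_cancel] at hld
      rw [hld]
    have hB : Int.shiftRight ((a : Nat) : Int)
        ((((Nat.size (Int.land ((a : Nat) : Int) (-((a : Nat) : Int))).toNat : Nat) : Int) - 1).toNat)
        = ((2 * b + 1 : Nat) : Int) := by
      rw [hland]
      have h1 : (((2 ^ k : Nat) : Int)).toNat = 2 ^ k := Int.toNat_natCast _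
      rw [h1, Nat.size_pow]
      have h2 : ((((k + 1 : Nat) : Nat) : Int) - 1).toNat = k := by omega
      rw [h2, show Int.shiftRight ((a : Nat) : Int) k = ((a >>> k : Nat) : Int) from rfl]
      congr 1
      rw [Nat.shiftRight_eq_div_pow, hab, Nat.mul_div_cancel_left _ (by positivity)]
    simp only [hA, hB]
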